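-- pv_equiv track=rewrite | github.com/nexon33/voynich-grammar-analysis | scripts/phase4/validate_case_system_empirically.py | extract_case_marked_words
-- ===== SOURCE A (Python) =====
-- def extract_case_marked_words(words):
--     """
--     Extract all words ending in -al, -ar, -ol, -or
--     """
--     case_words = {"al": [], "ar": [], "ol": [], "or": []}
--
--     for word in words:
--         if word.endswith("al") and len(word) > 2:
--             case_words["al"].append(word)
--         elif word.endswith("ar") and len(word) > 2:
--             case_words["ar"].append(word)
--         elif word.endswith("ol") and len(word) > 2:
--             case_words["ol"].append(word)
--         elif word.endswith("or") and len(word) > 2: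
--             case_words["or"].append(word)
--
--     return case_words
-- ===== SOURCE B (Python) =====
-- def extract_case_marked_words(words):
--     """
--     Extract all words ending in -al, -ar, -ol, -or
--     """
--     return {
--         s: [w for w in words if w.endswith(s) and len(w) > 2]
--         for s in ("al", "ar", "ol", "or")
--     }
-- ===== Notes on version B (the rewrite author's own statement) =====
-- stated objective: idiomatic
-- what changed: Replaces the single branching pass that mutates a pre-built dict with a dict comprehension that builds each bucket by an independent filtering scan per suffix (correct because the four 2-char suffixes are mutually exclusive).
import Mathlib
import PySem

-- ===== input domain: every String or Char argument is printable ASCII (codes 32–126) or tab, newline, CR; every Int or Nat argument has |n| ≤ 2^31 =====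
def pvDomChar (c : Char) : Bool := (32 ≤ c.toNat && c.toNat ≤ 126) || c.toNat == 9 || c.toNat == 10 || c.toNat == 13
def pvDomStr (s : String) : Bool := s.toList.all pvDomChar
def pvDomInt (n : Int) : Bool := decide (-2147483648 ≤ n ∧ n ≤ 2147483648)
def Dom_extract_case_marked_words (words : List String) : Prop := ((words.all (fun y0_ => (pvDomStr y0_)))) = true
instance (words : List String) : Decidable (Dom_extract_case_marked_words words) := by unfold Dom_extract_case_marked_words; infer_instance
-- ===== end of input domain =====

-- B replaces A's single branching pass over a mutable dict with a per-suffix filtering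
-- comprehension (idiomatic; same O(n) cost).


-- ===== PORT A =====
def extract_case_marked_words (words : List String) : List (String × List String) :=
  (words.foldl (fun case_words word =>
      if PySem.Str.endswith word "al" && decide ((PySem.Str.len word : Int) > 2) then
        case_words.modify "al" [] (· ++ [word])
      else if PySem.Str.endswith word "ar" && decide ((PySem.Str.len word : Int) > 2) then
        case_words.modify "ar" [] (· ++ [word])
      else if PySem.Str.endswith word "ol" && decide ((PySem.Str.len word : Int) > 2) then
        case_words.modify "ol" [] (· ++ [word])
      else if PySem.Str.endswith word "or" && decide ((PySem.Str.len word : Int) > 2) then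
        case_words.modify "or" [] (· ++ [word])
      else case_words)
    (PySem.Dict.ofList [("al", []), ("ar", []), ("ol", []), ("or", [])])).items

-- ===== PORT B =====
def extract_case_marked_words_alt (words : List String) : List (String × List String) :=
  (["al", "ar", "ol", "or"]).map (fun s =>
    (s, words.filter (fun w => PySem.Str.endswith w s && decide ((PySem.Str.len w : Int) > 2))))

-- ===== PRECONDITION & SPEC =====
def Spec_extract_case_marked_words (words : List String) (out : List (String × List String)) : Prop := out = extract_case_marked_words_alt words
instance (words : List String) (out : List (String × List String)) : Decidable (Spec_extract_case_marked_words words out) := by unfold Spec_extract_case_marked_words; infer_instance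

-- ===== CLAIM (what is proved, stated in full; the proofs are below) =====
def Claim_equal_extract_case_marked_words : Prop := ∀ (words : List String), Dom_extract_case_marked_words words → Spec_extract_case_marked_words words (extract_case_marked_words words)

-- ===== LEMMAS AND PROOFS =====

-- the per-word update of A's loop, named for the invariant lemma
def pvStepA (case_words : PySem.Dict String (List String)) (word : String) :
    PySem.Dict String (List String) :=
  if PySem.Str.endswith word "al" && decide ((PySem.Str.len word : Int) > 2) then
    case_words.modify "al" [] (· ++ [word])
  else if PySem.Str.endswith word "ar" && decide ((PySem.Str.len word : Int) > 2) then
    case_words.modify "ar" [] (· ++ [word])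
  else if PySem.Str.endswith word "ol" && decide ((PySem.Str.len word : Int) > 2) then
    case_words.modify "ol" [] (· ++ [word])
  else if PySem.Str.endswith word "or" && decide ((PySem.Str.len word : Int) > 2) then
    case_words.modify "or" [] (· ++ [word])
  else case_words

def pvKeep (s : String) (w : String) : Bool :=
  PySem.Str.endswith w s && decide ((PySem.Str.len w : Int) > 2)

-- two distinct equal-length suffixes cannot both end the same word
theorem pvKeep_excl {w s t : String} (hne : s.toList ≠ t.toList)
    (hl : s.toList.length = t.toList.length)
    (hs : pvKeep s w = true) (ht : pvKeep t w = true) : False := by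
  simp only [pvKeep, Bool.and_eq_true, PySem.Str.endswith_eq] at hs ht
  have h1 := (PySem.Chars.endswith_iff _ _).mp hs.1
  have h2 := (PySem.Chars.endswith_iff _ _).mp ht.1
  exact hne ((List.suffix_iff_eq_drop.mp h1).trans
    (by rw [hl]; exact (List.suffix_iff_eq_drop.mp h2).symm))

-- each word lands in at most one bucket
theorem pvClassify (w : String) :
    (pvKeep "al" w = true ∧ pvKeep "ar" w = false ∧ pvKeep "ol" w = false ∧ pvKeep "or" w = false) ∨
    (pvKeep "al" w = false ∧ pvKeep "ar" w = true ∧ pvKeep "ol" w = false ∧ pvKeep "or" w = false) ∨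
    (pvKeep "al" w = false ∧ pvKeep "ar" w = false ∧ pvKeep "ol" w = true ∧ pvKeep "or" w = false) ∨
    (pvKeep "al" w = false ∧ pvKeep "ar" w = false ∧ pvKeep "ol" w = false ∧ pvKeep "or" w = true) ∨
    (pvKeep "al" w = false ∧ pvKeep "ar" w = false ∧ pvKeep "ol" w = false ∧ pvKeep "or" w = false) := by
  have excl : ∀ {s t : String}, s.toList ≠ t.toList → s.toList.length = t.toList.length →
      pvKeep s w = true → pvKeep t w = false ∨ pvKeep t w = true → pvKeep t w = false := by
    intro s t hne hl hs h
    rcases h with h | h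
    · exact h
    · exact absurd (pvKeep_excl hne hl hs h) id
  have dec : ∀ b : Bool, b = true ∨ b = false := fun b => by cases b <;> simp
  rcases dec (pvKeep "al" w) with h1 | h1
  · exact Or.inl ⟨h1, excl (by decide) (by decide) h1 (dec _).symm,
      excl (by decide) (by decide) h1 (dec _).symm, excl (by decide) (by decide) h1 (dec _).symm⟩
  rcases dec (pvKeep "ar" w) with h2 | h2
  · exact Or.inr (Or.inl ⟨h1, h2, excl (by decide) (by decide) h2 (dec _).symm,
      excl (by decide) (by decide) h2 (dec _).symm⟩)
  rcases dec (pvKeep "ol" w) with h3 | h3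
  · exact Or.inr (Or.inr (Or.inl ⟨h1, h2, h3, excl (by decide) (by decide) h3 (dec _).symm⟩))
  rcases dec (pvKeep "or" w) with h4 | h4
  · exact Or.inr (Or.inr (Or.inr (Or.inl ⟨h1, h2, h3, h4⟩)))
  · exact Or.inr (Or.inr (Or.inr (Or.inr ⟨h1, h2, h3, h4⟩)))

-- loop invariant: folding A's step over ws from a dict with exactly the four buckets
-- appends, to each bucket, the words of ws that pvKeep accepts for its suffix
theorem pvFold_invariant (ws : List String) (a b c d : List String) :
    (ws.foldl pvStepA (PySem.Dict.mk [("al", a), ("ar", b), ("ol", c), ("or", d)])).items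
      = [("al", a ++ ws.filter (pvKeep "al")), ("ar", b ++ ws.filter (pvKeep "ar")),
         ("ol", c ++ ws.filter (pvKeep "ol")), ("or", d ++ ws.filter (pvKeep "or"))] := by
  induction ws generalizing a b c d with
  | nil => simp
  | cons w ws ih =>
    simp only [List.foldl_cons]
    have hstep : pvStepA (PySem.Dict.mk [("al", a), ("ar", b), ("ol", c), ("or", d)]) w =
        if pvKeep "al" w then (PySem.Dict.mk [("al", a), ("ar", b), ("ol", c), ("or", d)]).modify "al" [] (· ++ [w])
        else if pvKeep "ar" w then (PySem.Dict.mk [("al", a), ("ar", b), ("ol", c), ("or", d)]).modify "ar" [] (· ++ [w])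
        else if pvKeep "ol" w then (PySem.Dict.mk [("al", a), ("ar", b), ("ol", c), ("or", d)]).modify "ol" [] (· ++ [w])
        else if pvKeep "or" w then (PySem.Dict.mk [("al", a), ("ar", b), ("ol", c), ("or", d)]).modify "or" [] (· ++ [w])
        else (PySem.Dict.mk [("al", a), ("ar", b), ("ol", c), ("or", d)]) := rfl
    rw [hstep]
    rcases pvClassify w with ⟨h1, h2, h3, h4⟩ | ⟨h1, h2, h3, h4⟩ | ⟨h1, h2, h3, h4⟩ |
      ⟨h1, h2, h3, h4⟩ | ⟨h1, h2, h3, h4⟩ <;>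
      simp [h1, h2, h3, h4, PySem.Dict.modify, PySem.Dict.getD, PySem.Dict.get?,
        PySem.Dict.insert, PySem.Dict.contains, ih]

-- ===== VERDICT (by name: the statement is the Claim_ definition above) =====
theorem extract_case_marked_words_spec : Claim_equal_extract_case_marked_words := by
  intro words _
  show extract_case_marked_words words = extract_case_marked_words_alt words
  have h := pvFold_invariant words [] [] [] []
  simp only [List.nil_append] at h
  exact h
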